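-- pv_equiv track=rewrite | github.com/AnDreV133/ReposterBot | main.py | parse_text_of_post
-- ===== SOURCE A (Python) =====
-- def parse_text_of_post(text: str, size: int):
--     if text == '':
--         return "[Пост без текста]"
--
--     is_parse = False
--     res_text = ""
--     for c in text:
--         if size == 0:
--             break
--         elif c == '[':
--             is_parse = True
--         elif c == '|' or c == ']':
--             is_parse = False
--         elif not is_parse:
--             res_text += c
--             size -= 1
--
--     if not size:
--         res_text += "..."
--
--     return res_text
-- ===== SOURCE B (Python) =====
-- def parse_text_of_post(text: str, size: int):
--     if text == '':
--         return "[Пост без текста]"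
--
--     # collect the visible characters: everything outside a '['..'|'/']' region
--     kept = []
--     visible = True
--     for c in text:
--         if c == '[':
--             visible = False
--         elif c == '|' or c == ']':
--             visible = True
--         elif visible:
--             kept.append(c)
--
--     # truncate to the budget; a fully used budget gets an ellipsis marker
--     res = ''.join(kept[:size])
--     if len(res) == size:
--         res += '...'
--     return res
-- ===== Notes on version B (the rewrite author's own statement) =====
-- stated objective: simpler
-- what changed: B replaces A's interleaved size-countdown with break by a filter-then-slice decomposition: one pass collects the visible characters, then truncation and the '...' marker follow from a slice and a length test; Pre_ excludes negative sizes, which are not a meaningful truncation budget (A's keep-everything-no-ellipsis there is an artefact of the countdown never reaching 0).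
-- outside the precondition, e.g. on parse_text_of_post('ab', -1): A returns 'ab', B returns 'a'
import Mathlib
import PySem

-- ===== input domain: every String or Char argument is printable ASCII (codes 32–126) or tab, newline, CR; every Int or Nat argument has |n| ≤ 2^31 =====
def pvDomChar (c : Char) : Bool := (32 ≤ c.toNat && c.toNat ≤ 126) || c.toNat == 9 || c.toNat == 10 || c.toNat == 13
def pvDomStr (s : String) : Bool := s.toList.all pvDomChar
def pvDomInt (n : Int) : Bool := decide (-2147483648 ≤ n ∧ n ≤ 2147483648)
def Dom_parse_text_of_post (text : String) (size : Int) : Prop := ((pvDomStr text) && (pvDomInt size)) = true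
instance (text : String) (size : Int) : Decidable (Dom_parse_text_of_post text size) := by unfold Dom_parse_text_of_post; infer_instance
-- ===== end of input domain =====

-- B restructures A's interleaved size-countdown/break into a filter-then-slice
-- decomposition (objective: simpler); equality of return values is proved for
-- nonnegative size.

-- ===== PORT A =====
-- A's for-loop with break: structural recursion over the characters, carrying
-- (is_parse, res_text, size); returns the accumulated text and remaining size.
def pvLoopA : List Char → Bool → List Char → Int → (List Char × Int)
  | [], _, res, size => (res, size)
  | c :: cs, is_parse, res, size =>
    if size == 0 then (res, size)
    else if c == '[' then pvLoopA cs true res size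
    else if c == '|' || c == ']' then pvLoopA cs false res size
    else if !is_parse then pvLoopA cs is_parse (res ++ [c]) (size - 1)
    else pvLoopA cs is_parse res size

def parse_text_of_post (text : String) (size : Int) : String :=
  if text == "" then "[Пост без текста]"
  else
    let (res_text, size') := pvLoopA text.toList false [] size
    let res_text := if size' == 0 then res_text ++ "...".toList else res_text
    String.mk res_text

-- ===== PORT B =====
-- B's filtering pass: the visible characters (outside a '['..'|'/']' region).
def pvKeptB : List Char → Bool → List Char
  | [], _ => []
  | c :: cs, visible =>
    if c == '[' then pvKeptB cs false
    else if c == '|' || c == ']' then pvKeptB cs true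
    else if visible then c :: pvKeptB cs visible
    else pvKeptB cs visible

def parse_text_of_post_alt (text : String) (size : Int) : String :=
  if text == "" then "[Пост без текста]"
  else
    let kept := pvKeptB text.toList true
    let res := PySem.List.slice kept none (some size)   -- kept[:size]
    let res := if (res.length : Int) == size then res ++ "...".toList else res
    String.mk res

-- ===== PRECONDITION & SPEC =====
-- Pre_ excludes negative sizes: a negative truncation budget is outside the
-- task's natural domain, and A's keep-everything-without-ellipsis value there
-- is an artefact of its countdown never reaching 0.
def Pre_parse_text_of_post (text : String) (size : Int) : Prop := 0 ≤ size
instance (text : String) (size : Int) : Decidable (Pre_parse_text_of_post text size) := by unfold Pre_parse_text_of_post; infer_instance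

def pvWitness_parse_text_of_post : String × Int := ("a[b|c]d", 2)

def Spec_parse_text_of_post (text : String) (size : Int) (out : String) : Prop := out = parse_text_of_post_alt text size
instance (text : String) (size : Int) (out : String) : Decidable (Spec_parse_text_of_post text size out) := by unfold Spec_parse_text_of_post; infer_instance

-- ===== CLAIM (what is proved, stated in full; the proofs are below) =====
def Claim_equal_parse_text_of_post : Prop := ∀ (text : String) (size : Int), Dom_parse_text_of_post text size → Pre_parse_text_of_post text size → Spec_parse_text_of_post text size (parse_text_of_post text size)

-- ===== LEMMAS AND PROOFS =====

-- With a nonnegative budget A's loop computes the slice kept[:size] (kept taken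
-- with the opposite flag polarity) and ends with budget size − min size (length kept).
theorem pvLoopA_nonneg (cs : List Char) (ip : Bool) (res : List Char) (size : Int)
    (h : 0 ≤ size) :
    pvLoopA cs ip res size =
      (res ++ (pvKeptB cs (!ip)).take size.toNat,
       size - min size ((pvKeptB cs (!ip)).length : Int)) := by
  induction cs generalizing ip res size with
  | nil => simp [pvLoopA, pvKeptB]; omega
  | cons c cs ih =>
    by_cases h0 : size = 0
    · subst h0
      simp [pvLoopA]
    · have hne : (size == 0) = false := by simp [h0]
      by_cases h1 : c = '['
      · simpa [pvLoopA, pvKeptB, hne, h1] using ih true res size h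
      · by_cases h2 : c = '|' ∨ c = ']'
        · have hb : (c == '|' || c == ']') = true := by
            rcases h2 with h2 | h2 <;> simp [h2]
          simpa [pvLoopA, pvKeptB, hne, h1, hb] using ih false res size h
        · have hb : (c == '|' || c == ']') = false := by
            simp only [not_or] at h2; simp [h2.1, h2.2]
          cases ip with
          | false =>
            have hpos : 0 < size := by omega
            have := ih false (res ++ [c]) (size - 1) (by omega)
            simp only [pvLoopA, hne, h1, hb, beq_iff_eq, if_false, Bool.not_false,
              if_true, this, pvKeptB, Bool.false_eq_true]
            have hnat : size.toNat = (size - 1).toNat + 1 := by omega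
            rw [hnat, List.take_succ_cons]
            simp only [List.append_assoc, List.singleton_append, List.length_cons,
              Prod.mk.injEq, true_and]
            push_cast
            omega
          | true =>
            simpa [pvLoopA, pvKeptB, hne, h1, hb] using ih true res size h

-- ===== VERDICT (by name: the statement is the Claim_ definition above) =====
theorem parse_text_of_post_spec : Claim_equal_parse_text_of_post := by
  intro text size _ hpre
  unfold Pre_parse_text_of_post at hpre
  unfold Spec_parse_text_of_post parse_text_of_post parse_text_of_post_alt
  by_cases hemp : text = ""
  · simp [hemp]
  · simp only [hemp, if_false, beq_iff_eq]
    rw [pvLoopA_nonneg _ _ _ _ hpre]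
    rw [PySem.List.slice_to _ hpre]
    set kept := pvKeptB text.toList true with hk
    simp only [Bool.not_false, List.nil_append, List.length_take]
    by_cases hge : ((kept.length : Int) ≥ size)
    · have h0 : size - min size ((kept.length : Int)) = 0 := by omega
      have hl : ((min size.toNat kept.length : Nat) : Int) = size := by push_cast; omega
      simp only [← hk]
      simp [h0, hl]
    · have h0 : size - min size ((kept.length : Int)) ≠ 0 := by omega
      have hl : ((min size.toNat kept.length : Nat) : Int) ≠ size := by push_cast; omega
      have htake : kept.take size.toNat = kept := by
        apply List.take_of_length_le; omega
      simp only [← hk]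
      have hl2 : ¬ (min (max size 0) (kept.length : Int) = size) := by omega
      simp [h0, htake, hl2]
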